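-- pv_equiv track=rewrite | github.com/nessa01macias/spotlight | backend/agents/agno/transit_agent.py | _rate_transit_access
-- ===== SOURCE A (Python) =====
-- from typing import Optional
--
-- def _rate_transit_access(
--
--     metro_distance: Optional[int],
--     tram_distance: Optional[int]
-- ) -> str:
--     """Rate transit access qualitatively"""
--     # Prioritize closest transit option
--     best_distance = min(
--         [d for d in [metro_distance, tram_distance] if d is not None],
--         default=None
--     )
--
--     if best_distance is None:
--         return "poor"
--     elif best_distance < 200:
--         return "excellent"
--     elif best_distance < 400:
--         return "good"
--     elif best_distance < 600:
--         return "fair"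
--     else:
--         return "poor"
-- ===== SOURCE B (Python) =====
-- from typing import Optional
--
-- _ORDER = ["excellent", "good", "fair", "poor"]
--
-- def _rate_one(d: Optional[int]) -> str:
--     """Rate a single transit option on its own."""
--     if d is None or d >= 600:
--         return "poor"
--     if d < 200:
--         return "excellent"
--     if d < 400:
--         return "good"
--     return "fair"
--
-- def _rate_transit_access(
--     metro_distance: Optional[int],
--     tram_distance: Optional[int]
-- ) -> str:
--     # Rate each option independently, then keep the better rating.
--     # Correct because the rating is monotone in distance, so the rating of
--     # the closest option is the best of the individual ratings.
--     return min(_rate_one(metro_distance), _rate_one(tram_distance),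
--                key=_ORDER.index)
-- ===== Notes on version B (the rewrite author's own statement) =====
-- stated objective: alternative
-- what changed: Instead of reducing the distances to a single minimum and then classifying it, B rates each transit option independently and returns the better of the two qualitative ratings (min by rating rank), relying on monotonicity of the rating in distance.
import Mathlib
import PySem

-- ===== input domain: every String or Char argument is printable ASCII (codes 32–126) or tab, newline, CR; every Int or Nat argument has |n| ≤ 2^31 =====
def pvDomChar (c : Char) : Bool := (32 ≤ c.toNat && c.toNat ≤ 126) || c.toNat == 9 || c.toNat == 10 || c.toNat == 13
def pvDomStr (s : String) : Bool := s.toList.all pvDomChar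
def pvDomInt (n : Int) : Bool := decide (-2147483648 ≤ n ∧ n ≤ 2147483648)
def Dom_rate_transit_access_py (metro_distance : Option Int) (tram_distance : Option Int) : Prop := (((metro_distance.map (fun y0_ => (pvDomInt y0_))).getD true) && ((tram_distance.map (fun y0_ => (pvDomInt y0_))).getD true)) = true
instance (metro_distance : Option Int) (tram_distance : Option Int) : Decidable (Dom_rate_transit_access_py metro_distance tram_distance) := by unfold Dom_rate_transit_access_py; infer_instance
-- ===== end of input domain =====

-- ===== PORT A =====
-- B rates each transit option independently and keeps the better rating, instead of
-- A's min-over-distances then one threshold chain; alternative decomposition, same cost.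
def rate_transit_access_py (metro_distance : Option Int) (tram_distance : Option Int) : String :=
  let best : Option Int :=
    PySem.List.min? ([metro_distance, tram_distance].filterMap id) (fun d => d)
  match best with
  | none => "poor"
  | some b =>
    if b < 200 then "excellent"
    else if b < 400 then "good"
    else if b < 600 then "fair"
    else "poor"

-- ===== PORT B =====
def pvOrder : List String := ["excellent", "good", "fair", "poor"]

-- rating of a single option
def pvRateOne (d : Option Int) : String :=
  match d with
  | none => "poor"
  | some x =>
    if x ≥ 600 then "poor"
    else if x < 200 then "excellent"
    else if x < 400 then "good"
    else "fair"

-- _ORDER.index (never fails on the four labels)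
def pvRank (s : String) : Nat := (PySem.List.index? pvOrder s).getD 0

-- min(r1, r2, key=_ORDER.index): first argument on ties
def rate_transit_access_py_alt (metro_distance : Option Int) (tram_distance : Option Int) : String :=
  let r1 := pvRateOne metro_distance
  let r2 := pvRateOne tram_distance
  if pvRank r1 ≤ pvRank r2 then r1 else r2

-- ===== PRECONDITION & SPEC =====
def Spec_rate_transit_access_py (metro_distance : Option Int) (tram_distance : Option Int) (out : String) : Prop := out = rate_transit_access_py_alt metro_distance tram_distance
instance (metro_distance : Option Int) (tram_distance : Option Int) (out : String) : Decidable (Spec_rate_transit_access_py metro_distance tram_distance out) := by unfold Spec_rate_transit_access_py; infer_instance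

-- ===== CLAIM (what is proved, stated in full; the proofs are below) =====
def Claim_equal_rate_transit_access_py : Prop := ∀ (metro_distance : Option Int) (tram_distance : Option Int), Dom_rate_transit_access_py metro_distance tram_distance → Spec_rate_transit_access_py metro_distance tram_distance (rate_transit_access_py metro_distance tram_distance)

-- ===== LEMMAS AND PROOFS =====
theorem pvRank_excellent : pvRank "excellent" = 0 := by decide
theorem pvRank_good : pvRank "good" = 1 := by decide
theorem pvRank_fair : pvRank "fair" = 2 := by decide
theorem pvRank_poor : pvRank "poor" = 3 := by decide

-- ===== VERDICT (by name: the statement is the Claim_ definition above) =====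
theorem rate_transit_access_py_spec : Claim_equal_rate_transit_access_py := by
  intro m t _
  unfold Spec_rate_transit_access_py rate_transit_access_py rate_transit_access_py_alt pvRateOne
  cases m with
  | none =>
    cases t with
    | none => simp [PySem.List.min?, pvRank_poor]
    | some b =>
      have hfm : ([(none : Option Int), some b].filterMap id) = [b] := by simp
      rw [hfm, PySem.List.min?_id_cons]
      simp only [List.foldl]
      split_ifs <;> simp_all [pvRank_excellent, pvRank_good, pvRank_fair, pvRank_poor] <;> omega
  | some a =>
    cases t with
    | none =>
      have hfm : ([some a, (none : Option Int)].filterMap id) = [a] := by simp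
      rw [hfm, PySem.List.min?_id_cons]
      simp only [List.foldl]
      split_ifs <;> simp_all [pvRank_excellent, pvRank_good, pvRank_fair, pvRank_poor] <;> omega
    | some b =>
      have hfm : ([some a, some b].filterMap id) = [a, b] := by simp
      rw [hfm, PySem.List.min?_id_cons]
      simp only [List.foldl]
      simp only [min_def]
      split_ifs <;> simp_all [pvRank_excellent, pvRank_good, pvRank_fair, pvRank_poor] <;> omega
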